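-- pv_equiv track=rewrite | github.com/issacting93/Convo-topo | scripts/filter-conversations.py | count_exchanges
-- ===== SOURCE A (Python) =====
-- from typing import List, Dict, Any
--
-- def count_exchanges(messages: List[Dict[str, str]]) -> int:
--     """Count actual back-and-forth exchanges."""
--     exchanges = 0
--     last_role = None
--
--     for msg in messages:
--         role = msg.get('role', '')
--         if role and role != last_role:
--             if last_role is not None:
--                 exchanges += 1
--             last_role = role
--
--     return exchanges
-- ===== SOURCE B (Python) =====
-- from typing import List, Dict, Any
--
-- def count_exchanges(messages: List[Dict[str, str]]) -> int:
--     """Count actual back-and-forth exchanges."""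
--     # Phase 1: extract the non-empty roles.
--     roles = [r for m in messages for r in (m.get('role', ''),) if r]
--     # Phase 2: count maximal runs of equal roles by jumping over each run.
--     n = len(roles)
--     runs = 0
--     i = 0
--     while i < n:
--         runs += 1
--         j = i + 1
--         while j < n and roles[j] == roles[i]:
--             j += 1
--         i = j
--     # exchanges = number of run boundaries = runs - 1 (0 when there are no runs)
--     return runs - 1 if runs else 0
-- ===== Notes on version B (the rewrite author's own statement) =====
-- stated objective: alternative
-- what changed: Instead of a stateful last_role loop counting transitions, B extracts the non-empty roles, counts the number of maximal runs of equal roles by index-jumping over each whole run with a nested while, and returns runs-1 (0 when empty).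
import Mathlib
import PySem

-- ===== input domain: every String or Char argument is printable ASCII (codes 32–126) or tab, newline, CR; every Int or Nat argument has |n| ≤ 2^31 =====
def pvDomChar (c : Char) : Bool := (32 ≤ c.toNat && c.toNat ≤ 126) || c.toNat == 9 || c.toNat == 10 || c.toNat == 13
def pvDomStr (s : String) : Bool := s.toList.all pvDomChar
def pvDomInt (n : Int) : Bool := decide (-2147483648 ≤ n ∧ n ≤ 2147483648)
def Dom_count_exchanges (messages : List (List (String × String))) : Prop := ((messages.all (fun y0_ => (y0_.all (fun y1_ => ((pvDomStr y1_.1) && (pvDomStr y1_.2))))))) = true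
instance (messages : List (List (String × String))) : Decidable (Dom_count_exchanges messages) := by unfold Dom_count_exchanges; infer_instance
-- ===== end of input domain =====

-- B replaces A's stateful last_role transition counter by: extract non-empty roles, count maximal runs of equal roles by jumping over each run, return runs - 1 (0 when empty); same cost, different decomposition.


-- ===== PORT A =====
def count_exchanges (messages : List (List (String × String))) : Int :=
  (messages.foldl
    (fun (st : Int × Option String) msg =>
      let role := (PySem.Dict.mk msg).getD "role" ""
      if role ≠ "" ∧ some role ≠ st.2 then
        ((if st.2.isSome then st.1 + 1 else st.1), some role)
      else st)
    (0, none)).1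

-- ===== PORT B =====
-- Source B's outer while loop: each iteration counts one run, and the inner
-- `while j < n and roles[j] == roles[i]` advance is the dropWhile over the run.
def pvRuns : List String → Int
  | [] => 0
  | h :: t => 1 + pvRuns (t.dropWhile (· == h))
termination_by l => l.length
decreasing_by
  simpa using Nat.lt_succ_of_le (List.length_dropWhile_le (· == h) t)

def count_exchanges_alt (messages : List (List (String × String))) : Int :=
  let roles := messages.filterMap
    (fun msg =>
      let r := (PySem.Dict.mk msg).getD "role" ""
      if r ≠ "" then some r else none)
  let runs := pvRuns roles
  if runs ≠ 0 then runs - 1 else 0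

-- ===== PRECONDITION & SPEC =====
def Spec_count_exchanges (messages : List (List (String × String))) (out : Int) : Prop := out = count_exchanges_alt messages
instance (messages : List (List (String × String))) (out : Int) : Decidable (Spec_count_exchanges messages out) := by unfold Spec_count_exchanges; infer_instance

-- ===== CLAIM (what is proved, stated in full; the proofs are below) =====
def Claim_equal_count_exchanges : Prop := ∀ (messages : List (List (String × String))), Dom_count_exchanges messages → Spec_count_exchanges messages (count_exchanges messages)

-- ===== LEMMAS AND PROOFS =====

-- count of adjacent unequal pairs: the bridge quantity between the two ports
def pvCnt : List String → Int
  | [] => 0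
  | [_] => 0
  | a :: b :: t => (if a ≠ b then 1 else 0) + pvCnt (b :: t)

def pvStepA (st : Int × Option String) (msg : List (String × String)) : Int × Option String :=
  let role := (PySem.Dict.mk msg).getD "role" ""
  if role ≠ "" ∧ some role ≠ st.2 then
    ((if st.2.isSome then st.1 + 1 else st.1), some role)
  else st

def pvRoles (messages : List (List (String × String))) : List String :=
  messages.filterMap
    (fun msg =>
      let r := (PySem.Dict.mk msg).getD "role" ""
      if r ≠ "" then some r else none)

theorem pvStepA_eq : (fun (st : Int × Option String) msg =>
      let role := (PySem.Dict.mk msg).getD "role" ""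
      if role ≠ "" ∧ some role ≠ st.2 then
        ((if st.2.isSome then st.1 + 1 else st.1), some role)
      else st) = pvStepA := rfl

theorem pvMain (msgs : List (List (String × String))) : ∀ (e : Int) (st : Option String),
    (msgs.foldl pvStepA (e, st)).1
      = e + pvCnt (match st with | none => pvRoles msgs | some r => r :: pvRoles msgs) := by
  induction msgs with
  | nil =>
    intro e st
    cases st <;> simp [pvRoles, pvCnt]
  | cons msg rest ih =>
    intro e st
    simp only [List.foldl_cons]
    by_cases hr : (PySem.Dict.mk msg).getD "role" "" = ""
    · have hstep : pvStepA (e, st) msg = (e, st) := by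
        unfold pvStepA; simp [hr]
      have hroles : pvRoles (msg :: rest) = pvRoles rest := by
        simp [pvRoles, hr]
      rw [hstep, ih, hroles]
    · have hroles : pvRoles (msg :: rest)
          = (PySem.Dict.mk msg).getD "role" "" :: pvRoles rest := by
        simp [pvRoles, hr]
      cases st with
      | none =>
        have hstep : pvStepA (e, none) msg = (e, some ((PySem.Dict.mk msg).getD "role" "")) := by
          unfold pvStepA; simp [hr]
        rw [hstep, ih, hroles]
      | some r =>
        by_cases heq : (PySem.Dict.mk msg).getD "role" "" = r
        · have hstep : pvStepA (e, some r) msg = (e, some r) := by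
            unfold pvStepA; simp [heq]
          rw [hstep, ih, hroles, heq]
          simp [pvCnt]
        · have hstep : pvStepA (e, some r) msg
              = (e + 1, some ((PySem.Dict.mk msg).getD "role" "")) := by
            unfold pvStepA; simp [hr, heq]
          rw [hstep, ih, hroles]
          have hne : r ≠ (PySem.Dict.mk msg).getD "role" "" := fun h => heq h.symm
          rw [show pvCnt (r :: (PySem.Dict.mk msg).getD "role" "" :: pvRoles rest)
              = (if r ≠ (PySem.Dict.mk msg).getD "role" "" then 1 else 0)
                + pvCnt ((PySem.Dict.mk msg).getD "role" "" :: pvRoles rest) from rfl,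
            if_pos hne]
          ring

theorem pvRuns_nil : pvRuns [] = 0 := by rw [pvRuns]

theorem pvRuns_cons (h : String) (t : List String) :
    pvRuns (h :: t) = 1 + pvRuns (t.dropWhile (· == h)) := by rw [pvRuns]

theorem pvRuns_eq_cnt : ∀ l : List String, l ≠ [] → pvRuns l = pvCnt l + 1 := by
  intro l
  induction l using pvCnt.induct with
  | case1 => intro h; exact absurd rfl h
  | case2 a =>
    intro _
    rw [pvRuns_cons]
    simp [pvRuns_nil, pvCnt]
  | case3 a b t ih =>
    intro _
    by_cases hab : a = b
    · subst hab
      have h1 : pvRuns (a :: a :: t) = pvRuns (a :: t) := by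
        rw [pvRuns_cons, pvRuns_cons a t]
        simp [List.dropWhile]
      have h2 : pvCnt (a :: a :: t) = pvCnt (a :: t) := by
        simp [pvCnt]
      rw [h1, h2, ih (by simp)]
    · have hba : (b == a) = false := by
        simp; exact fun h => hab h.symm
      have h1 : pvRuns (a :: b :: t) = 1 + pvRuns (b :: t) := by
        rw [pvRuns_cons]
        simp [List.dropWhile, hba]
      have h2 : pvCnt (a :: b :: t) = 1 + pvCnt (b :: t) := by
        simp [pvCnt, hab]
      rw [h1, h2, ih (by simp)]
      ring

theorem pvCnt_nonneg : ∀ l : List String, 0 ≤ pvCnt l := by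
  intro l
  induction l using pvCnt.induct with
  | case1 => simp [pvCnt]
  | case2 a => simp [pvCnt]
  | case3 a b t ih =>
    rw [show pvCnt (a :: b :: t) = (if a ≠ b then 1 else 0) + pvCnt (b :: t) from rfl]
    split <;> omega

-- ===== VERDICT (by name: the statement is the Claim_ definition above) =====
theorem alt_eq (messages : List (List (String × String))) :
    count_exchanges_alt messages
      = if pvRuns (pvRoles messages) ≠ 0 then pvRuns (pvRoles messages) - 1 else 0 := rfl

theorem count_exchanges_spec : Claim_equal_count_exchanges := by
  intro messages _
  unfold Spec_count_exchanges count_exchanges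
  rw [pvStepA_eq, pvMain messages 0 none]
  show (0 : Int) + pvCnt (pvRoles messages) = count_exchanges_alt messages
  rw [alt_eq]
  by_cases h : pvRoles messages = []
  · rw [h, pvRuns_nil]
    simp [pvCnt]
  · have heq := pvRuns_eq_cnt _ h
    have hnn := pvCnt_nonneg (pvRoles messages)
    rw [heq, if_pos (by omega)]
    omega
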